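-- pv_equiv track=rewrite | github.com/diegoenterprises/saurellius | backend/routes/i9_routes.py | validate_document_combination
-- ===== SOURCE A (Python) =====
-- def validate_document_combination(documents):
--     """Validate that documents meet I-9 requirements"""
--     if not documents:
--         return False
--
--     categories = [d.get('list_category', '').upper() for d in documents]
--
--     # List A alone is sufficient
--     if 'A' in categories:
--         return True
--
--     # Otherwise need both B and C
--     has_b = 'B' in categories
--     has_c = 'C' in categories
--
--     return has_b and has_c
-- ===== SOURCE B (Python) =====
-- def _satisfy(docs, combos):
--     """True iff some requirement combo can be fully crossed off by the docs.
--     Each combo is the set of categories still needed; a doc's category is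
--     subtracted from every combo, and we stop as soon as one combo is empty."""
--     if any(not c for c in combos):
--         return True
--     if not docs:
--         return False
--     cat = docs[0].get('list_category', '').upper()
--     return _satisfy(docs[1:], [c - {cat} for c in combos])
--
--
-- def validate_document_combination(documents):
--     """Validate that documents meet I-9 requirements"""
--     # acceptable combinations: List A alone, or List B together with List C
--     return _satisfy(documents, [{'A'}, {'B', 'C'}])
-- ===== Notes on version B (the rewrite author's own statement) =====
-- stated objective: alternative
-- what changed: B is a recursive residual-requirement search: it carries the table of acceptable combinations [{'A'},{'B','C'}] as sets of still-needed categories, subtracts each document's category from every combo, and succeeds as soon as one combo is emptied, instead of A's build-a-category-list followed by three membership scans.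
import Mathlib
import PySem

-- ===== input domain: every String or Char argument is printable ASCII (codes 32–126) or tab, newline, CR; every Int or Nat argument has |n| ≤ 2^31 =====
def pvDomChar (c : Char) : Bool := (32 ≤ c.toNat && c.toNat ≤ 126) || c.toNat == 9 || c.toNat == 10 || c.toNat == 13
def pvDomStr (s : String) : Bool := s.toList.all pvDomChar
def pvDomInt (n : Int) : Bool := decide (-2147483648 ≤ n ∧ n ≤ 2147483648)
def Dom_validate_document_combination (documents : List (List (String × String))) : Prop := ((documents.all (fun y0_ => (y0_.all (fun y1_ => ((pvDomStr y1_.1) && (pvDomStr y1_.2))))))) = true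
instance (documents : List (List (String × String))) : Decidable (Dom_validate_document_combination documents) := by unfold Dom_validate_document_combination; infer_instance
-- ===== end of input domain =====

-- B replaces A's category-list + three membership scans by a recursive residual-requirement search over the combo table [{'A'},{'B','C'}] (objective: alternative).


-- ===== PORT A =====
def validate_document_combination (documents : List (List (String × String))) : Bool :=
  if documents.isEmpty then false
  else
    let categories := documents.map (fun d => PySem.Str.upper (PySem.Dict.getD (PySem.Dict.mk d) "list_category" ""))
    if categories.contains "A" then true
    else
      let has_b := categories.contains "B"
      let has_c := categories.contains "C"
      has_b && has_c

-- ===== PORT B =====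
-- _satisfy: combos are PySem-style sets (distinct-element lists); c - {cat} is the filter keeping elements ≠ cat
def pySatisfy : List (List (String × String)) → List (List String) → Bool
  | docs, combos =>
    if combos.any List.isEmpty then true
    else
      match docs with
      | [] => false
      | d :: rest =>
        let cat := PySem.Str.upper (PySem.Dict.getD (PySem.Dict.mk d) "list_category" "")
        pySatisfy rest (combos.map (fun c => c.filter (fun x => !(x == cat))))

def validate_document_combination_alt (documents : List (List (String × String))) : Bool :=
  pySatisfy documents [["A"], ["B", "C"]]

-- ===== PRECONDITION & SPEC =====
def Spec_validate_document_combination (documents : List (List (String × String))) (out : Bool) : Prop := out = validate_document_combination_alt documents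
instance (documents : List (List (String × String))) (out : Bool) : Decidable (Spec_validate_document_combination documents out) := by unfold Spec_validate_document_combination; infer_instance

-- ===== CLAIM (what is proved, stated in full; the proofs are below) =====
def Claim_equal_validate_document_combination : Prop := ∀ (documents : List (List (String × String))), Dom_validate_document_combination documents → Spec_validate_document_combination documents (validate_document_combination documents)

-- ===== LEMMAS AND PROOFS =====

def pvCat (d : List (String × String)) : String :=
  PySem.Str.upper (PySem.Dict.getD (PySem.Dict.mk d) "list_category" "")

lemma pvFilter_all (cat : String) (cats : List String) (c : List String) :
    (c.filter (fun x => !(x == cat))).all (fun x => cats.contains x)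
      = c.all (fun x => (x == cat) || cats.contains x) := by
  induction c with
  | nil => rfl
  | cons a c ih =>
    by_cases h : a = cat
    · subst h; simp
    · have hb : (a == cat) = false := beq_eq_false_iff_ne.mpr h
      simp only [List.filter_cons, hb, Bool.not_false, if_true, List.all_cons, ih, Bool.false_or]

lemma pySatisfy_char (docs : List (List (String × String))) :
    ∀ combos : List (List String),
      pySatisfy docs combos
        = combos.any (fun c => c.all (fun x => (docs.map pvCat).contains x)) := by
  induction docs with
  | nil =>
    intro combos
    rw [pySatisfy]
    have h2 : (combos.any fun c => c.all (fun x => (([] : List (List (String × String))).map pvCat).contains x)) = combos.any List.isEmpty := by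
      induction combos with
      | nil => rfl
      | cons c cs ihc =>
        simp only [List.any_cons, ihc]
        cases c <;> simp
    rw [h2]
    cases hc : combos.any List.isEmpty <;> simp
  | cons d rest ih =>
    intro combos
    rw [pySatisfy]
    by_cases he : combos.any List.isEmpty
    · simp only [he, if_true]
      rcases List.any_eq_true.mp he with ⟨c, hc, hce⟩
      have : c = [] := by cases c <;> simp_all
      subst this
      exact (List.any_eq_true.mpr ⟨[], hc, by simp⟩).symm
    · simp only [he, if_false, Bool.false_eq_true]
      rw [ih, List.any_map]
      have hpw : (fun c : List String => (c.filter (fun x => !(x == pvCat d))).all (fun x => (rest.map pvCat).contains x))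
          = fun c : List String => c.all (fun x => ((d :: rest).map pvCat).contains x) := by
        funext c
        rw [pvFilter_all]
        have hp : (fun x : String => (x == pvCat d) || (rest.map pvCat).contains x)
            = fun x : String => ((d :: rest).map pvCat).contains x := by
          funext x
          by_cases hx : x = pvCat d <;> simp [hx]
        rw [hp]
      exact congrArg _ hpw

-- ===== VERDICT (by name: the statement is the Claim_ definition above) =====
theorem validate_document_combination_spec : Claim_equal_validate_document_combination := by
  intro documents _
  unfold Spec_validate_document_combination validate_document_combination validate_document_combination_alt
  rw [pySatisfy_char]
  cases documents with
  | nil => simp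
  | cons d rest =>
    simp only [List.isEmpty_cons, Bool.false_eq_true, if_false]
    have hmap : ((d :: rest).map fun d => PySem.Str.upper (PySem.Dict.getD (PySem.Dict.mk d) "list_category" "")) = (d :: rest).map pvCat := rfl
    rw [hmap]
    generalize (d :: rest).map pvCat = cats
    cases hA : cats.contains "A" <;> cases hB : cats.contains "B" <;> cases hC : cats.contains "C" <;>
      simp_all [List.any_cons, List.all_cons]
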